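-- pv_equiv track=rewrite | github.com/timoteostewart/timbos-hn-reader | utils_text.py | split_domain_on_chars
-- ===== SOURCE A (Python) =====
-- CHARS_IN_DOMAINS_BREAK_BEFORE = "."
--
-- CHARS_IN_DOMAINS_BREAK_AFTER = "-"
--
-- def split_domain_on_chars(domain_string: str):
--     result = []
--     cur_part = ""
--     for char in domain_string:
--         if char in CHARS_IN_DOMAINS_BREAK_BEFORE:
--             result.append(cur_part)
--             result.append(f"&ZeroWidthSpace;{char}")
--             cur_part = ""
--         elif char in CHARS_IN_DOMAINS_BREAK_AFTER:
--             result.append(cur_part)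
--             result.append(f"{char}&ZeroWidthSpace;")
--             cur_part = ""
--         else:
--             cur_part += char
--     if cur_part:
--         result.append(cur_part)
--     return result
-- ===== SOURCE B (Python) =====
-- import re
--
-- def split_domain_on_chars(domain_string: str):
--     out = []
--     for token in re.split(r'([.-])', domain_string):
--         if token == '.':
--             out.append('&ZeroWidthSpace;.')
--         elif token == '-':
--             out.append('-&ZeroWidthSpace;')
--         else:
--             out.append(token)
--     if out and out[-1] == '':
--         out.pop()
--     return out
-- ===== Notes on version B (the rewrite author's own statement) =====
-- stated objective: idiomatic
-- what changed: B replaces A's character-by-character accumulator loop with a regex tokenization (re.split with a captured separator class) followed by a single token-mapping pass and a trailing-empty pop.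
import Mathlib
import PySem

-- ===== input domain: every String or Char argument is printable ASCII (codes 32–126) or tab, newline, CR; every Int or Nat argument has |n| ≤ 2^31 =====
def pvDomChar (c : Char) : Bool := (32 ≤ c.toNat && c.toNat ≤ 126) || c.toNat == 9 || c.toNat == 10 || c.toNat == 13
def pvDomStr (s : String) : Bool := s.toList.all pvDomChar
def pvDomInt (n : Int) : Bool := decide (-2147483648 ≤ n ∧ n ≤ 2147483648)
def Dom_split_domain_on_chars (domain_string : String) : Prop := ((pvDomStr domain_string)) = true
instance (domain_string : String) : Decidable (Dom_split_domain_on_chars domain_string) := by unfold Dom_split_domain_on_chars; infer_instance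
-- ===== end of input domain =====

-- B replaces A's character-accumulator loop by a regex-style tokenization into
-- alternating chunks and captured separators, a single mapping pass, and a
-- trailing-empty pop (objective: idiomatic; same O(n) cost).

-- ===== PORT A =====
-- the body of A's for-loop, on state (result, cur_part)
def pvAStep (st : List String × List Char) (c : Char) : List String × List Char :=
  if c = '.' then
    (st.1 ++ [String.ofList st.2, "&ZeroWidthSpace;" ++ String.ofList [c]], [])
  else if c = '-' then
    (st.1 ++ [String.ofList st.2, String.ofList [c] ++ "&ZeroWidthSpace;"], [])
  else
    (st.1, st.2 ++ [c])

-- A's trailing 'if cur_part: result.append(cur_part)'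
def pvAFin (st : List String × List Char) : List String :=
  if st.2 ≠ [] then st.1 ++ [String.ofList st.2] else st.1

-- literal transliteration of A: fold the loop body over the characters, then finalize
def split_domain_on_chars (domain_string : String) : List String :=
  pvAFin (domain_string.toList.foldl pvAStep ([], []))

-- ===== PORT B =====
-- hand port of re.split(r'([.-])', s): alternating text chunks and captured
-- single-character separators (exact for this pattern: each '.'/'-' becomes a
-- separator token, chunks are the maximal runs in between, incl. empty ones)
def pvTokenize : List Char → List (List Char)
  | [] => [[]]
  | c :: rest =>
    if c = '.' ∨ c = '-' then [] :: [c] :: pvTokenize rest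
    else
      match pvTokenize rest with
      | [] => [[c]]   -- unreachable: pvTokenize never returns []
      | t :: ts => (c :: t) :: ts

-- the body of B's for-loop: map each token
def pvMapTok (t : List Char) : String :=
  if t = ['.'] then "&ZeroWidthSpace;."
  else if t = ['-'] then "-&ZeroWidthSpace;"
  else String.ofList t

def split_domain_on_chars_alt (domain_string : String) : List String :=
  let out := (pvTokenize domain_string.toList).map pvMapTok
  -- if out and out[-1] == '': out.pop()
  match out.getLast? with
  | some t => if t = "" then out.dropLast else out
  | none => out

-- ===== PRECONDITION & SPEC =====
def Spec_split_domain_on_chars (domain_string : String) (out : List String) : Prop := out = split_domain_on_chars_alt domain_string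
instance (domain_string : String) (out : List String) : Decidable (Spec_split_domain_on_chars domain_string out) := by unfold Spec_split_domain_on_chars; infer_instance

-- ===== CLAIM (what is proved, stated in full; the proofs are below) =====
def Claim_equal_split_domain_on_chars : Prop := ∀ (domain_string : String), Dom_split_domain_on_chars domain_string → Spec_split_domain_on_chars domain_string (split_domain_on_chars domain_string)

-- ===== LEMMAS AND PROOFS =====

-- A's loop, written recursively (result prefix factored out)
def pvGo : List Char → List Char → List String
  | [], cur => if cur ≠ [] then [String.ofList cur] else []
  | c :: cs, cur =>
    if c = '.' then String.ofList cur :: ("&ZeroWidthSpace;" ++ String.ofList [c]) :: pvGo cs []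
    else if c = '-' then String.ofList cur :: (String.ofList [c] ++ "&ZeroWidthSpace;") :: pvGo cs []
    else pvGo cs (cur ++ [c])

-- B's trailing-empty pop, as a function
def pvTrim (l : List String) : List String :=
  match l.getLast? with
  | some t => if t = "" then l.dropLast else l
  | none => l

lemma pvTrim_cons (x : String) (l : List String) (h : l ≠ []) :
    pvTrim (x :: l) = x :: pvTrim l := by
  cases l with
  | nil => exact absurd rfl h
  | cons y ys =>
    simp only [pvTrim, List.getLast?_cons_cons]
    cases (y :: ys).getLast? with
    | none => rfl
    | some t =>
      by_cases ht : t = "" <;> simp [ht]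

lemma pvTokenize_ne_nil (cs : List Char) : pvTokenize cs ≠ [] := by
  cases cs with
  | nil => simp [pvTokenize]
  | cons c rest =>
    simp only [pvTokenize]
    split_ifs
    · simp
    · cases pvTokenize rest <;> simp

-- merging an empty pending chunk into the first token is the identity
lemma pvHead_merge (cs : List Char) :
    (([] : List Char) ++ (pvTokenize cs).headI) :: (pvTokenize cs).tail
      = pvTokenize cs := by
  cases htk : pvTokenize cs with
  | nil => exact absurd htk (pvTokenize_ne_nil cs)
  | cons t ts => simp [List.headI, List.tail]

lemma pvOfList_ne_empty (cur : List Char) (h : cur ≠ []) : String.ofList cur ≠ "" := by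
  intro he
  apply h
  have := congrArg String.toList he
  simpa using this

-- A's loop equals A's accumulator fold
lemma pvFoldl_eq_go (cs : List Char) (res : List String) (cur : List Char) :
    pvAFin (cs.foldl pvAStep (res, cur)) = res ++ pvGo cs cur := by
  induction cs generalizing res cur with
  | nil =>
    simp only [List.foldl_nil, pvGo, pvAFin]
    split_ifs <;> simp_all
  | cons c rest ih =>
    simp only [List.foldl_cons, pvGo, pvAStep]
    by_cases h1 : c = '.'
    · simp only [if_pos h1, ih, List.append_assoc]
      simp [h1]
    · by_cases h2 : c = '-'
      · simp only [if_neg h1, if_pos h2, ih, List.append_assoc]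
        simp [h2]
      · simp [h1, h2, ih]

-- main bridge: A's recursive loop with pending chunk cur equals B's pipeline
-- with cur merged into the first token
lemma pvGo_eq_trim (cs : List Char) (cur : List Char)
    (hcur : ∀ c ∈ cur, ¬(c = '.' ∨ c = '-')) :
    pvGo cs cur
      = pvTrim (List.map pvMapTok
          ((cur ++ (pvTokenize cs).headI) :: (pvTokenize cs).tail)) := by
  have hdot : cur ≠ ['.'] := by
    intro h; exact (hcur '.' (by simp [h])) (Or.inl rfl)
  have hdash : cur ≠ ['-'] := by
    intro h; exact (hcur '-' (by simp [h])) (Or.inr rfl)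
  have hmcur : pvMapTok cur = String.ofList cur := by
    simp [pvMapTok, hdot, hdash]
  induction cs generalizing cur with
  | nil =>
    simp only [pvTokenize, List.headI, List.tail, List.append_nil, List.map, hmcur, pvGo]
    by_cases h : cur = []
    · simp [h, pvTrim]
    · simp [h, pvTrim, pvOfList_ne_empty cur h]
  | cons c rest ih =>
    simp only [pvTokenize, pvGo]
    have hmapne : List.map pvMapTok (pvTokenize rest) ≠ [] := by
      simp [pvTokenize_ne_nil rest]
    by_cases h1 : c = '.'
    · have hsep : c = '.' ∨ c = '-' := Or.inl h1
      simp only [if_pos hsep, if_pos h1, List.headI, List.tail, List.append_nil,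
        List.map, hmcur]
      have h3 : pvMapTok [c] = "&ZeroWidthSpace;" ++ String.ofList [c] := by
        subst h1; decide
      rw [pvTrim_cons _ _ (by simp), pvTrim_cons _ _ hmapne, h3,
          ← pvHead_merge rest, ← ih [] (by simp) (by simp) (by simp) (by simp [pvMapTok])]
    · by_cases h2 : c = '-'
      · have hsep : c = '.' ∨ c = '-' := Or.inr h2
        simp only [if_pos hsep, if_neg h1, if_pos h2, List.headI, List.tail,
          List.append_nil, List.map, hmcur]
        have h3 : pvMapTok [c] = String.ofList [c] ++ "&ZeroWidthSpace;" := by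
          subst h2; decide
        rw [pvTrim_cons _ _ (by simp), pvTrim_cons _ _ hmapne, h3,
            ← pvHead_merge rest, ← ih [] (by simp) (by simp) (by simp) (by simp [pvMapTok])]
      · have hsep : ¬(c = '.' ∨ c = '-') := by tauto
        simp only [if_neg hsep, if_neg h1, if_neg h2]
        have hcur' : ∀ x ∈ cur ++ [c], ¬(x = '.' ∨ x = '-') := by
          intro x hx
          rcases List.mem_append.mp hx with h | h
          · exact hcur x h
          · simp at h; subst h; exact hsep
        have hdot' : cur ++ [c] ≠ ['.'] := by
          intro h; exact (hcur' '.' (by simp [h])) (Or.inl rfl)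
        have hdash' : cur ++ [c] ≠ ['-'] := by
          intro h; exact (hcur' '-' (by simp [h])) (Or.inr rfl)
        rw [ih (cur ++ [c]) hcur' hdot' hdash' (by simp [pvMapTok, hdot', hdash'])]
        cases htk : pvTokenize rest with
        | nil => exact absurd htk (pvTokenize_ne_nil rest)
        | cons t ts => simp [List.headI, List.tail]

-- ===== VERDICT (by name: the statement is the Claim_ definition above) =====
theorem split_domain_on_chars_spec : Claim_equal_split_domain_on_chars := by
  intro s _
  show split_domain_on_chars s = split_domain_on_chars_alt s
  have hA := pvFoldl_eq_go s.toList [] []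
  simp only [List.nil_append] at hA
  have hB := pvGo_eq_trim s.toList [] (by simp)
  rw [pvHead_merge] at hB
  simp only [split_domain_on_chars]
  rw [hA, hB]
  rfl
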